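-- pv_equiv track=rewrite | github.com/Programator2/adventofcode | 2024/24b.py | incorrect_z
-- ===== SOURCE A (Python) =====
-- def incorrect_z(s: int, n: int) -> [str]:
--     i = 0
--     incorrect = []
--     while s or n:
--         a = s % 2
--         b = n % 2
--         s //= 2
--         n //= 2
--         if a != b:
--             incorrect.append(f'z{i:02}')
--         i += 1
--     return incorrect
-- ===== SOURCE B (Python) =====
-- def incorrect_z(s: int, n: int) -> [str]:
--     bits = bin(s ^ n)[2:][::-1]
--     return [f'z{i:02}' for i, bit in enumerate(bits) if bit == '1']
-- ===== Notes on version B (the rewrite author's own statement) =====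
-- stated objective: alternative
-- what changed: B builds the binary string bin(s ^ n) once, reverses it, and emits labels with a filtered enumerate comprehension over its characters, replacing A's arithmetic loop that halves s and n in parallel and compares their low bits each iteration.
import Mathlib
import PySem

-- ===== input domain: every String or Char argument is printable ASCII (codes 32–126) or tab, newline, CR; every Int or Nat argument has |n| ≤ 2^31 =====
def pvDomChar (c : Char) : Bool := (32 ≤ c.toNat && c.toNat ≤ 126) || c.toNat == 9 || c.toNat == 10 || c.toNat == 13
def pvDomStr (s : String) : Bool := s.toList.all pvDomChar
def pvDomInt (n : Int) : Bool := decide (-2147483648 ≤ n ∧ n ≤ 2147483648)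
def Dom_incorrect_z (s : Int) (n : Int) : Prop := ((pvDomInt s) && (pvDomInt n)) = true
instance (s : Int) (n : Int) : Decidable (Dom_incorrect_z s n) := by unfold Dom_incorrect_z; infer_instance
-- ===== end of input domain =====

-- B builds the binary string bin(s ^ n), reverses it, and filters an enumerate comprehension
-- over its characters, instead of A's arithmetic loop halving s and n in parallel
-- (alternative decomposition; equivalence of RETURN values).

-- f'z{i:02}' for the loop counter i (always ≥ 0 here): "z" + str(i) zero-padded to width 2
def pvFmtZ (i : Int) : String := "z" ++ PySem.Str.zfill (PySem.Int.toStr i) 2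

-- ===== PORT A =====
-- the while loop of A; fuel bounds the iteration count (sufficient whenever 0 ≤ s, 0 ≤ n)
def pvLoopA : Nat → Int → Int → Int → List String → List String
  | 0, _, _, _, acc => acc
  | fuel + 1, s, n, i, acc =>
    if s ≠ 0 ∨ n ≠ 0 then
      let a := PySem.Int.mod s 2
      let b := PySem.Int.mod n 2
      let s' := PySem.Int.floordiv s 2
      let n' := PySem.Int.floordiv n 2
      let acc' := if a ≠ b then acc ++ [pvFmtZ i] else acc
      pvLoopA fuel s' n' (i + 1) acc'
    else acc

def incorrect_z (s : Int) (n : Int) : List String :=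
  pvLoopA (s.natAbs + n.natAbs + 1) s n 0 []

-- ===== PORT B =====
def incorrect_z_alt (s : Int) (n : Int) : List String :=
  -- bits = bin(s ^ n)[2:][::-1]   ([::-1] = reverse, PySem.Str.slice?_none_none_neg_one;
  -- the getD "" default is unreachable since the step -1 ≠ 0), then
  -- [f'z{i:02}' for i, bit in enumerate(bits) if bit == '1']
  (PySem.List.enumerate
    (((PySem.Str.slice? (PySem.Str.slice (PySem.Int.pyBin (PySem.Int.bxor s n)) (some 2) none)
        none none (-1)).getD "").toList) 0).filterMap
    (fun p => if p.2 = '1' then some (pvFmtZ p.1) else none)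

-- ===== PRECONDITION & SPEC =====
-- A's while loop never terminates when s < 0 or n < 0 (floor division drives them to -1 and keeps
-- them there), so Pre_ admits exactly the inputs on which the Python A returns.
def Pre_incorrect_z (s : Int) (n : Int) : Prop := 0 ≤ s ∧ 0 ≤ n
instance (s : Int) (n : Int) : Decidable (Pre_incorrect_z s n) := by unfold Pre_incorrect_z; infer_instance

def pvWitness_incorrect_z : Int × Int := (5, 6)

def Spec_incorrect_z (s : Int) (n : Int) (out : List String) : Prop := out = incorrect_z_alt s n
instance (s : Int) (n : Int) (out : List String) : Decidable (Spec_incorrect_z s n out) := by unfold Spec_incorrect_z; infer_instance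

-- ===== CLAIM (what is proved, stated in full; the proofs are below) =====
def Claim_equal_incorrect_z : Prop := ∀ (s : Int) (n : Int), Dom_incorrect_z s n → Pre_incorrect_z s n → Spec_incorrect_z s n (incorrect_z s n)

-- ===== LEMMAS AND PROOFS =====

-- canonical list of labels of the set bits of d, starting at position i
def pvBits (d : Nat) (i : Int) : List String :=
  if h : d = 0 then []
  else (if d % 2 = 1 then [pvFmtZ i] else []) ++ pvBits (d / 2) (i + 1)
  termination_by d
  decreasing_by exact Nat.div_lt_self (Nat.pos_of_ne_zero h) one_lt_two

lemma pvBits_zero (i : Int) : pvBits 0 i = [] := by rw [pvBits]; simp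

-- binary digits of d, least significant first (= reversed Nat.toDigits 2 d)
def pvRevDigits (d : Nat) : List Char :=
  if h : d / 2 = 0 then [Nat.digitChar (d % 2)]
  else Nat.digitChar (d % 2) :: pvRevDigits (d / 2)
  termination_by d
  decreasing_by
    exact Nat.div_lt_self (by omega) one_lt_two

lemma pvToDigitsCore_eq : ∀ (fuel n : Nat) (acc : List Char), n < fuel →
    Nat.toDigitsCore 2 fuel n acc = (pvRevDigits n).reverse ++ acc := by
  intro fuel
  induction fuel with
  | zero => intro n acc h; omega
  | succ f ih =>
    intro n acc h
    rw [Nat.toDigitsCore]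
    by_cases h2 : n / 2 = 0
    · rw [pvRevDigits]
      simp [h2]
    · have hlt : n / 2 < f := by
        have hn : 0 < n := by omega
        have := Nat.div_lt_self hn one_lt_two
        omega
      simp only [h2, if_false]
      rw [ih (n / 2) _ hlt]
      conv_rhs => rw [pvRevDigits]
      simp [h2]

lemma pvToDigits_eq (n : Nat) : Nat.toDigits 2 n = (pvRevDigits n).reverse :=
  by simpa using pvToDigitsCore_eq (n + 1) n [] (by omega)

def pvEmit : Int × Char → Option String :=
  fun p => if p.2 = '1' then some (pvFmtZ p.1) else none

lemma pvFilterMap_revDigits : ∀ (m : Nat), 0 < m → ∀ (i : Int),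
    (PySem.List.enumerate (pvRevDigits m) i).filterMap pvEmit = pvBits m i := by
  intro m
  induction m using Nat.strong_induction_on with
  | _ m ih =>
    intro hm i
    rw [pvRevDigits, pvBits]
    have hm0 : m ≠ 0 := by omega
    simp only [hm0, dite_false]
    have hmod : m % 2 = 0 ∨ m % 2 = 1 := by omega
    by_cases h2 : m / 2 = 0
    · -- m = 1
      have hm1 : m = 1 := by omega
      subst hm1
      have hd : Nat.digitChar 1 = '1' := by decide
      simp [PySem.List.enumerate_cons, PySem.List.enumerate_nil, pvEmit, pvBits_zero, hd]
    · simp only [h2, dite_false]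
      rw [PySem.List.enumerate_cons, List.filterMap_cons]
      have hrec := ih (m / 2) (Nat.div_lt_self (by omega) one_lt_two) (by omega) (i + 1)
      rcases hmod with hp | hp
      · have hd : Nat.digitChar 0 = '0' := by decide
        simp [pvEmit, hp, hd]
        exact hrec
      · have hd : Nat.digitChar 1 = '1' := by decide
        simp [pvEmit, hp, hd]
        exact hrec

-- B computes pvBits of the xor
lemma pvAlt_eq_bits (s n : Int) (hs : 0 ≤ s) (hn : 0 ≤ n) :
    incorrect_z_alt s n = pvBits (s.toNat ^^^ n.toNat) 0 := by
  unfold incorrect_z_alt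
  rw [PySem.Int.bxor_of_nonneg hs hn]
  generalize s.toNat ^^^ n.toNat = m
  have hbin : PySem.Int.pyBin ((m : Nat) : Int) =
      String.ofList ('0' :: 'b' :: Nat.toDigits 2 m) := by
    unfold PySem.Int.pyBin PySem.Int.toBinChars0b
    have : ¬ ((m : Int) < 0) := by omega
    simp [this]
  rw [hbin]
  have htail : PySem.Str.slice (String.ofList ('0' :: 'b' :: Nat.toDigits 2 m)) (some 2) none
      = String.ofList (Nat.toDigits 2 m) := by
    unfold PySem.Str.slice
    congr 1
    rw [show ((2 : Int)) = ((2 : Nat) : Int) from rfl, PySem.Chars.slice_eq_listSlice,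
      PySem.List.slice_from_natCast]
    simp
  rw [htail, PySem.Str.slice?_none_none_neg_one]
  simp only [Option.getD_some]
  have hlist : (String.ofList ((String.ofList (Nat.toDigits 2 m)).toList.reverse)).toList
      = pvRevDigits m := by
    simp [pvToDigits_eq]
  rw [hlist]
  by_cases hm0 : m = 0
  · subst hm0
    rw [pvRevDigits]
    simp [PySem.List.enumerate_cons, PySem.List.enumerate_nil, pvBits_zero,
      show Nat.digitChar (0 % 2) = '0' from rfl]
  · exact pvFilterMap_revDigits m (by omega) 0

lemma pvXor_mod_two (a b : Nat) : (a ^^^ b) % 2 = (a % 2) ^^^ (b % 2) := by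
  have := Nat.and_one_is_mod (a ^^^ b)
  have ha := Nat.and_one_is_mod a
  have hb := Nat.and_one_is_mod b
  rw [← this, ← ha, ← hb, Nat.and_xor_distrib_right]

lemma pvXor_div_two (a b : Nat) : (a ^^^ b) / 2 = (a / 2) ^^^ (b / 2) := by
  apply Nat.eq_of_testBit_eq
  intro j
  simp [Nat.testBit_div_two, Nat.testBit_xor]

lemma pvLoopA_eq_bits : ∀ (fuel : Nat) (s n i : Int) (acc : List String),
    0 ≤ s → 0 ≤ n → s.natAbs + n.natAbs < fuel →
    pvLoopA fuel s n i acc = acc ++ pvBits (s.natAbs ^^^ n.natAbs) i := by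
  intro fuel
  induction fuel with
  | zero => intro s n i acc _ _ h; omega
  | succ f ih =>
    intro s n i acc hs hn h
    by_cases h0 : s = 0 ∧ n = 0
    · obtain ⟨rfl, rfl⟩ := h0
      simp [pvLoopA, pvBits_zero]
    · rw [pvLoopA]
      have hcond : s ≠ 0 ∨ n ≠ 0 := by tauto
      simp only [hcond, if_pos, ne_eq, if_true]
      obtain ⟨sa, rfl⟩ : ∃ sa : Nat, s = (sa : Int) := ⟨s.toNat, (Int.toNat_of_nonneg hs).symm⟩
      obtain ⟨na, rfl⟩ : ∃ na : Nat, n = (na : Int) := ⟨n.toNat, (Int.toNat_of_nonneg hn).symm⟩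
      simp only [Int.natAbs_natCast] at h ⊢
      have hfd_s : PySem.Int.floordiv (sa : Int) 2 = ((sa / 2 : Nat) : Int) := by
        exact_mod_cast PySem.Int.floordiv_natCast sa 2
      have hfd_n : PySem.Int.floordiv (na : Int) 2 = ((na / 2 : Nat) : Int) := by
        exact_mod_cast PySem.Int.floordiv_natCast na 2
      have hmod_s : PySem.Int.mod (sa : Int) 2 = ((sa % 2 : Nat) : Int) := by
        exact_mod_cast PySem.Int.mod_natCast sa 2
      have hmod_n : PySem.Int.mod (na : Int) 2 = ((na % 2 : Nat) : Int) := by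
        exact_mod_cast PySem.Int.mod_natCast na 2
      rw [hfd_s, hfd_n, hmod_s, hmod_n]
      have hlt : sa / 2 + na / 2 < f := by
        have hs2 := Nat.div_le_self sa 2
        have hn2 := Nat.div_le_self na 2
        have : 0 < sa ∨ 0 < na := by
          rcases hcond with hc | hc
          · left; omega
          · right; omega
        rcases this with hpos | hpos
        · have := Nat.div_lt_self hpos one_lt_two; omega
        · have := Nat.div_lt_self hpos one_lt_two; omega
      rw [ih _ _ (i + 1) _ (Int.natCast_nonneg _) (Int.natCast_nonneg _)
        (by simpa using hlt)]
      simp only [Int.natAbs_natCast]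
      rw [← pvXor_div_two]
      by_cases hx0 : sa ^^^ na = 0
      · have heq : sa = na := Nat.xor_eq_zero.mp hx0
        subst heq
        simp [hx0, pvBits_zero]
      · conv_rhs => rw [pvBits]
        simp only [hx0, dite_false]
        have hpar : ((sa % 2 : Nat) : Int) ≠ ((na % 2 : Nat) : Int) ↔ (sa ^^^ na) % 2 = 1 := by
          rw [pvXor_mod_two]
          have h1 : sa % 2 = 0 ∨ sa % 2 = 1 := by omega
          have h2 : na % 2 = 0 ∨ na % 2 = 1 := by omega
          rcases h1 with h1 | h1 <;> rcases h2 with h2 | h2 <;> simp [h1, h2]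
        by_cases hcase : ((sa % 2 : Nat) : Int) = ((na % 2 : Nat) : Int)
        · have hnp : ¬ (sa ^^^ na) % 2 = 1 := fun hc => (hpar.mpr hc) hcase
          rw [if_neg (not_not_intro hcase), if_neg hnp]
          simp
        · rw [if_pos hcase, if_pos (hpar.mp hcase)]
          simp

theorem pvMain (s n : Int) (hs : 0 ≤ s) (hn : 0 ≤ n) :
    incorrect_z s n = incorrect_z_alt s n := by
  unfold incorrect_z
  rw [pvLoopA_eq_bits (s.natAbs + n.natAbs + 1) s n 0 [] hs hn (by omega)]
  rw [pvAlt_eq_bits s n hs hn]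
  have h1 : s.natAbs = s.toNat := by omega
  have h2 : n.natAbs = n.toNat := by omega
  rw [h1, h2]
  simp

-- ===== VERDICT (by name: the statement is the Claim_ definition above) =====
theorem incorrect_z_spec : Claim_equal_incorrect_z := by
  intro s n _ hpre
  exact pvMain s n hpre.1 hpre.2
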